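-- pv_equiv track=rewrite | github.com/ManishAradwad/Competitive-Programming | Codeforces/AzamonWebServices.py | solve
-- ===== SOURCE A (Python) =====
-- def solve(a,b):
--     t,s = list(a),"".join(sorted(a))
--     for i in range(len(a)):
--         if t[i] != s[i]:
--             y = a.rindex(s[i])
--             t[i],t[y] = t[y],t[i]
--             break
--     z = "".join(t)
--     return(z if z<b else "---")
-- ===== SOURCE B (Python) =====
-- def solve(a, b):
--     # One right-to-left pass tracking the suffix minimum and its last index,
--     # recording the leftmost position strictly above the min of what follows;
--     # the swapped string is built by slicing instead of mutating a list.
--     m = y = sw = None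
--     for j in range(len(a) - 1, -1, -1):
--         c = a[j]
--         if m is None or c < m:
--             m, y = c, j
--         elif c > m:
--             sw = (j, y)
--     if sw is None:
--         z = a
--     else:
--         i, y = sw
--         z = a[:i] + a[y] + a[i+1:y] + a[i] + a[y+1:]
--     return z if z < b else "---"
-- ===== Notes on version B (the rewrite author's own statement) =====
-- stated objective: alternative
-- what changed: Replaces sorting the whole string and scanning for the first mismatch against the sorted copy (plus a separate rindex pass) with a single right-to-left pass that carries the suffix minimum, its last index and the pending swap, and builds the result by slicing instead of mutating a list copy.
import Mathlib
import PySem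

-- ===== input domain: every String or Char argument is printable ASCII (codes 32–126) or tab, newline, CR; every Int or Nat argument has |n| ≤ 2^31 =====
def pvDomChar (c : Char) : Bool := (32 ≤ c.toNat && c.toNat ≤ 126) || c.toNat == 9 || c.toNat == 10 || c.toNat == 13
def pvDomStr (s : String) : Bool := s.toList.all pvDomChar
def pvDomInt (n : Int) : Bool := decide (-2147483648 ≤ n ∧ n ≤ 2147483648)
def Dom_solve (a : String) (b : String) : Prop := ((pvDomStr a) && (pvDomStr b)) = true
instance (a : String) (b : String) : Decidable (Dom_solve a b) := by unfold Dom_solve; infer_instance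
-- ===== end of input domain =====

-- B replaces A's sort-and-compare by a single right-to-left pass carrying the suffix
-- minimum, its last index and the pending swap, and builds the result by slicing.

-- ===== PORT A =====
-- Python's a.rindex(c) (last index of c; in A, c is always a character of a, so the
-- not-found case is unreachable and .getD 0 is never used)
def pyRindexAux (c : Char) : List Char → Option Nat
  | [] => none
  | x :: xs =>
      match pyRindexAux c xs with
      | some j => some (j + 1)
      | none => if x = c then some 0 else none

-- Python's simultaneous swap t[i], t[y] = t[y], t[i] (both indices in range in A)
def pySwap (t : List Char) (i y : Nat) : List Char :=
  (t.set i (t.getD y ' ')).set y (t.getD i ' ')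

-- the loop 'for i in range(len(a)): if t[i] != s[i]: … break': index of the first mismatch
def mismatchIdx : List Char → List Char → Option Nat
  | x :: xs, y :: ys => if x ≠ y then some 0 else (mismatchIdx xs ys).map (· + 1)
  | _, _ => none

def solve (a : String) (b : String) : String :=
  let t := a.toList
  let s := PySem.List.sorted a.toList (fun x => x) false
  let t' :=
    match mismatchIdx t s with
    | none => t
    | some i =>
        let c := s.getD i ' '
        let y := (pyRindexAux c a.toList).getD 0
        pySwap t i y
  let z := String.ofList t'
  if z < b then z else "---"

-- ===== PORT B =====
-- Source B's single loop 'for j in range(len(a)-1, -1, -1)', written as structural recursion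
-- on the suffix; the loop state (m, y, sw) is carried with indices RELATIVE to the current
-- suffix (shifted by +1 per step), which is the same data as Source B's absolute indices.
def scanB : List Char → Option (Char × Nat) × Option (Nat × Nat)
  | [] => (none, none)
  | c :: cs =>
      let r := scanB cs
      match r.1 with
      | none => (some (c, 0), r.2)
      | some (m, y) =>
          if c < m then (some (c, 0), r.2.map (fun p => (p.1 + 1, p.2 + 1)))
          else if m < c then (some (m, y + 1), some (0, y + 1))
          else (some (m, y + 1), r.2.map (fun p => (p.1 + 1, p.2 + 1)))

def solve_alt (a : String) (b : String) : String :=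
  let t := a.toList
  let z :=
    match (scanB t).2 with
    | none => a
    | some (i, y) =>
        -- z = a[:i] + a[y] + a[i+1:y] + a[i] + a[y+1:]  (both indices in range here,
        -- so plain getD is exact for the single-character lookups)
        String.ofList (PySem.List.slice t none (some (i : Int)) ++ [t.getD y ' ']
          ++ PySem.List.slice t (some ((i : Int) + 1)) (some (y : Int)) ++ [t.getD i ' ']
          ++ PySem.List.slice t (some ((y : Int) + 1)) none)
  if z < b then z else "---"

-- ===== PRECONDITION & SPEC =====
def Spec_solve (a : String) (b : String) (out : String) : Prop := out = solve_alt a b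
instance (a : String) (b : String) (out : String) : Decidable (Spec_solve a b out) := by unfold Spec_solve; infer_instance

-- ===== CLAIM (what is proved, stated in full; the proofs are below) =====
def Claim_equal_solve : Prop := ∀ (a : String) (b : String), Dom_solve a b → Spec_solve a b (solve a b)

-- ===== LEMMAS AND PROOFS =====

-- proof-only abstractions: the suffix-minimum list and the first position strictly above it
def suffConsAux (x : Char) : List Char → List Char
  | [] => [x]
  | m :: ms => (if m < x then m else x) :: m :: ms

def suffixMin : List Char → List Char
  | [] => []
  | x :: xs => suffConsAux x (suffixMin xs)

def firstGreater : List Char → List Char → Option Nat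
  | x :: xs, y :: ys => if y < x then some 0 else (firstGreater xs ys).map (· + 1)
  | _, _ => none

-- the head of suffixMin xs is the minimum of xs
theorem suffixMin_head (xs : List Char) (h : xs ≠ []) :
    ∃ m ms, suffixMin xs = m :: ms ∧ m ∈ xs ∧ ∀ c ∈ xs, m ≤ c := by
  induction xs with
  | nil => exact absurd rfl h
  | cons x xs ih =>
    cases hxs : xs with
    | nil =>
      refine ⟨x, [], by simp [suffixMin, suffConsAux], List.mem_cons_self, ?_⟩
      intro c hc; rw [List.mem_singleton] at hc; simp [hc]
    | cons y ys =>
      obtain ⟨m, ms, hm, hmem, hle⟩ := ih (by simp [hxs])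
      rw [← hxs] at *
      refine ⟨if m < x then m else x, m :: ms, by simp [suffixMin, hm, suffConsAux], ?_, ?_⟩
      · split_ifs with hlt
        · exact List.mem_cons_of_mem x hmem
        · exact List.mem_cons_self
      · intro c hc
        rcases List.mem_cons.mp hc with rfl | hc
        · split_ifs with hlt
          · exact le_of_lt hlt
          · exact le_refl c
        · split_ifs with hlt
          · exact hle c hc
          · exact le_trans (not_lt.mp hlt) (hle c hc)

-- sorting a list whose head is ≤ every element keeps the head in place
theorem sorted_cons_of_le (x : Char) (xs : List Char) (h : ∀ c ∈ xs, x ≤ c) :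
    PySem.List.sorted (x :: xs) (fun c => c) false
      = x :: PySem.List.sorted xs (fun c => c) false := by
  apply PySem.List.eq_of_perm_of_pairwise_le_of_injective (fun c => c) (fun _ _ h => h)
  · exact (PySem.List.sorted_perm _ _ _).trans
      (List.Perm.cons x (PySem.List.sorted_perm _ _ _).symm)
  · exact PySem.List.sorted_pairwise _ _
  · exact List.Pairwise.cons
      (fun c hc => h c ((PySem.List.mem_sorted _ _ _ _).mp hc))
      (PySem.List.sorted_pairwise _ _)

theorem mismatchIdx_cons (x y : Char) (xs ys : List Char) :
    mismatchIdx (x :: xs) (y :: ys)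
      = if x ≠ y then some 0 else (mismatchIdx xs ys).map (· + 1) := rfl

theorem firstGreater_cons (x y : Char) (xs ys : List Char) :
    firstGreater (x :: xs) (y :: ys)
      = if y < x then some 0 else (firstGreater xs ys).map (· + 1) := rfl

-- A's first mismatch against sorted(a) is the first position strictly above the suffix
-- minimum, and the character fetched there is that suffix minimum
theorem key_lemma (t : List Char) :
    mismatchIdx t (PySem.List.sorted t (fun c => c) false) = firstGreater t (suffixMin t) ∧
    ∀ i, mismatchIdx t (PySem.List.sorted t (fun c => c) false) = some i →
      (PySem.List.sorted t (fun c => c) false).getD i ' ' = (suffixMin t).getD i ' ' := by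
  induction t with
  | nil => exact ⟨rfl, by intro i hi; simp [mismatchIdx] at hi⟩
  | cons x xs ih =>
    rcases List.eq_nil_or_concat' xs with rfl | _
    · constructor
      · simp [PySem.List.sorted, PySem.List.insertBy, mismatchIdx, firstGreater,
          suffixMin, suffConsAux]
      · intro i hi
        simp [PySem.List.sorted, PySem.List.insertBy, mismatchIdx] at hi
    · have hxs : xs ≠ [] := by rename_i h'; obtain ⟨_, _, rfl⟩ := h'; simp
      obtain ⟨m, ms, hm, hmem, hle⟩ := suffixMin_head xs hxs
      have hsuf : suffixMin (x :: xs) = (if m < x then m else x) :: m :: ms := by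
        simp [suffixMin, hm, suffConsAux]
      by_cases hxm : x ≤ m
      · have hall : ∀ c ∈ xs, x ≤ c := fun c hc => le_trans hxm (hle c hc)
        have hs : PySem.List.sorted (x :: xs) (fun c => c) false
            = x :: PySem.List.sorted xs (fun c => c) false := sorted_cons_of_le x xs hall
        have hmin : (if m < x then m else x) = x := if_neg (not_lt.mpr hxm)
        rw [hs, hsuf, hmin]
        constructor
        · rw [mismatchIdx_cons, firstGreater_cons, if_neg (by simp), if_neg (lt_irrefl x),
            ← hm, ih.1]
        · intro i hi
          rw [mismatchIdx_cons, if_neg (by simp)] at hi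
          rw [Option.map_eq_some_iff] at hi
          obtain ⟨j, hj, rfl⟩ := hi
          simpa [← hm] using ih.2 j hj
      · have hmx : m < x := not_le.mp hxm
        obtain ⟨h0, tl, hS⟩ : ∃ h0 tl,
            PySem.List.sorted (x :: xs) (fun c => c) false = h0 :: tl := by
          cases hS : PySem.List.sorted (x :: xs) (fun c => c) false with
          | nil => simp [PySem.List.sorted_eq_nil_iff] at hS
          | cons h0 tl => exact ⟨h0, tl, rfl⟩
        have hhead : h0 = m := by
          have h1 : ∀ y ∈ x :: xs, h0 ≤ y := PySem.List.key_head_sorted_le _ _ hS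
          have h0mem : h0 ∈ x :: xs :=
            (PySem.List.mem_sorted (x :: xs) (fun c => c) false h0).mp
              (hS ▸ List.mem_cons_self)
          have hle0 : h0 ≤ m := h1 m (List.mem_cons_of_mem x hmem)
          rcases List.mem_cons.mp h0mem with rfl | hmem0
          · exact absurd (lt_of_le_of_lt hle0 hmx) (lt_irrefl h0)
          · exact le_antisymm hle0 (hle h0 hmem0)
        have hmin : (if m < x then m else x) = m := if_pos hmx
        rw [hS, hsuf, hmin, hhead]
        constructor
        · rw [mismatchIdx_cons, firstGreater_cons, if_pos (by simp [ne_of_gt hmx]),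
            if_pos hmx]
        · intro i hi
          rw [mismatchIdx_cons, if_pos (by simp [ne_of_gt hmx])] at hi
          cases hi; rfl

-- pyRindexAux basics
theorem pyRindexAux_isSome (c : Char) (xs : List Char) :
    (pyRindexAux c xs).isSome = true ↔ c ∈ xs := by
  induction xs with
  | nil => simp [pyRindexAux]
  | cons x xs ih =>
    cases hr : pyRindexAux c xs with
    | some j =>
      simp only [pyRindexAux, hr, Option.isSome_some, true_iff]
      exact List.mem_cons_of_mem x (ih.mp (by simp [hr]))
    | none =>
      have hnot : c ∉ xs := fun hmem => by
        have h2 := ih.mpr hmem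
        rw [hr] at h2
        simp at h2
      simp only [pyRindexAux, hr]
      by_cases hx : x = c
      · subst hx
        simp
      · rw [if_neg hx]
        simp [List.mem_cons, hnot, Ne.symm hx]

theorem pyRindexAux_lt (c : Char) (xs : List Char) (y : Nat)
    (h : pyRindexAux c xs = some y) : y < xs.length := by
  induction xs generalizing y with
  | nil => simp [pyRindexAux] at h
  | cons x xs ih =>
    cases hr : pyRindexAux c xs with
    | some j =>
      simp [pyRindexAux, hr] at h
      subst h; simpa using Nat.succ_lt_succ (ih j hr)
    | none =>
      simp [pyRindexAux, hr] at h
      obtain ⟨-, rfl⟩ := h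
      simp

theorem pyRindexAux_ge (c : Char) (xs : List Char) (y k : Nat)
    (h : pyRindexAux c xs = some y) (hk : k < xs.length) (he : xs.getD k ' ' = c) : k ≤ y := by
  induction xs generalizing y k with
  | nil => simp at hk
  | cons x xs ih =>
    cases hr : pyRindexAux c xs with
    | some j =>
      simp [pyRindexAux, hr] at h
      subst h
      cases k with
      | zero => exact Nat.zero_le _
      | succ k' =>
        exact Nat.succ_le_succ (ih j k' hr (by simpa using hk) (by simpa using he))
    | none =>
      cases k with
      | zero => exact Nat.zero_le _
      | succ k' =>
        exfalso
        have hk' : k' < xs.length := by simpa using hk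
        have hgd : xs.getD k' ' ' = c := by simpa using he
        have hmem : c ∈ xs := by
          rw [List.getD_eq_getElem?_getD, List.getElem?_eq_getElem hk'] at hgd
          simp only [Option.getD_some] at hgd
          exact hgd ▸ List.getElem_mem hk'
        have hS := (pyRindexAux_isSome c xs).mpr hmem
        rw [hr] at hS
        simp at hS

-- properties of the fired position of firstGreater against the suffix minimum
theorem fg_spec (t : List Char) (i : Nat)
    (h : firstGreater t (suffixMin t) = some i) :
    i < t.length ∧ (suffixMin t).getD i ' ' < t.getD i ' ' ∧
      (suffixMin t).getD i ' ' ∈ t.drop i := by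
  induction t generalizing i with
  | nil => simp [firstGreater] at h
  | cons x xs ih =>
    rcases eq_or_ne xs [] with rfl | hxs'
    · simp [suffixMin, suffConsAux, firstGreater] at h
    · obtain ⟨m, ms, hm, hmem, hle⟩ := suffixMin_head xs hxs'
      have hsuf : suffixMin (x :: xs) = (if m < x then m else x) :: m :: ms := by
        simp [suffixMin, hm, suffConsAux]
      rw [hsuf, firstGreater_cons] at h
      by_cases hlt : (if m < x then m else x) < x
      · rw [if_pos hlt] at h
        injection h with h
        subst h
        refine ⟨by simp, ?_, ?_⟩
        · rw [hsuf]; simpa using hlt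
        · rw [hsuf]
          simp only [List.getD_cons_zero, List.drop_zero]
          split_ifs with hmx
          · exact List.mem_cons_of_mem x hmem
          · exact List.mem_cons_self
      · rw [if_neg hlt] at h
        rw [Option.map_eq_some_iff] at h
        obtain ⟨j, hj, rfl⟩ := h
        have hj' : firstGreater xs (suffixMin xs) = some j := by rw [hm]; exact hj
        obtain ⟨h1, h2, h3⟩ := ih j hj'
        refine ⟨by simpa using Nat.succ_lt_succ h1, ?_, ?_⟩
        · rw [hsuf]; simpa [hm] using h2
        · rw [hsuf]; simpa [hm] using h3

-- the invariant of Source B's loop: scanB computes the suffix minimum with its last index,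
-- and the first position strictly above the minimum of what follows, paired with that
-- minimum's last index
theorem scanB_spec (xs : List Char) :
    (scanB xs).1 = (suffixMin xs).head?.map (fun m => (m, (pyRindexAux m xs).getD 0)) ∧
    (scanB xs).2 = (firstGreater xs (suffixMin xs)).map
        (fun i => (i, (pyRindexAux ((suffixMin xs).getD i ' ') xs).getD 0)) := by
  induction xs with
  | nil => exact ⟨rfl, rfl⟩
  | cons c cs ih =>
    rcases eq_or_ne cs [] with rfl | hcs'
    · constructor
      · simp [scanB, suffixMin, suffConsAux, pyRindexAux]
      · simp [scanB, suffixMin, suffConsAux, firstGreater_cons, firstGreater]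
    · obtain ⟨m, ms, hm, hmem, hle⟩ := suffixMin_head cs hcs'
      obtain ⟨j, hj⟩ : ∃ j, pyRindexAux m cs = some j := by
        have hS := (pyRindexAux_isSome m cs).mpr hmem
        cases hr : pyRindexAux m cs with
        | some j => exact ⟨j, rfl⟩
        | none => rw [hr] at hS; simp at hS
      have h1 : (scanB cs).1 = some (m, j) := by
        rw [ih.1, hm]; simp [hj]
      have hsuf : suffixMin (c :: cs) = (if m < c then m else c) :: m :: ms := by
        simp [suffixMin, hm, suffConsAux]
      -- generic fact about lifting the tail's swap by one position
      have hshift : (scanB cs).2.map (fun p => (p.1 + 1, p.2 + 1))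
          = (firstGreater cs (m :: ms)).map
              (fun i => (i + 1, (pyRindexAux ((m :: ms).getD i ' ') (c :: cs)).getD 0)) := by
        rw [ih.2, hm, Option.map_map]
        cases hF : firstGreater cs (m :: ms) with
        | none => simp
        | some i =>
          have hF' : firstGreater cs (suffixMin cs) = some i := by rw [hm]; exact hF
          obtain ⟨hi1, hi2, hi3⟩ := fg_spec cs i hF'
          rw [hm] at hi3
          have hmemcs : (m :: ms).getD i ' ' ∈ cs := List.mem_of_mem_drop hi3
          obtain ⟨k, hk⟩ : ∃ k, pyRindexAux ((m :: ms).getD i ' ') cs = some k := by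
            have hS := (pyRindexAux_isSome _ cs).mpr hmemcs
            cases hr : pyRindexAux ((m :: ms).getD i ' ') cs with
            | some k => exact ⟨k, rfl⟩
            | none => rw [hr] at hS; simp at hS
          have hstep : pyRindexAux ((m :: ms).getD i ' ') (c :: cs) = some (k + 1) := by
            simp only [pyRindexAux, hk]
          simp only [Option.map_some, Function.comp, hk, hstep, Option.getD_some]
      by_cases hcm : c < m
      · have hhd : (if m < c then m else c) = c := if_neg (not_lt.mpr (le_of_lt hcm))
        have hnot : pyRindexAux c cs = none := by
          cases hr : pyRindexAux c cs with
          | none => rfl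
          | some k =>
            have hmc : c ∈ cs := (pyRindexAux_isSome c cs).mp (by simp [hr])
            exact absurd (hle c hmc) (not_le.mpr hcm)
        constructor
        · rw [hsuf, hhd]
          simp [scanB, h1, if_pos hcm, pyRindexAux, hnot]
        · rw [hsuf, hhd, firstGreater_cons, if_neg (lt_irrefl c)]
          simp only [scanB, h1, if_pos hcm]
          rw [hshift]
          cases hF : firstGreater cs (m :: ms) with
          | none => simp
          | some i => simp
      · by_cases hmc : m < c
        · have hhd : (if m < c then m else c) = m := if_pos hmc
          constructor
          · rw [hsuf, hhd]
            simp [scanB, h1, if_neg (not_lt.mpr (le_of_lt hmc)), if_pos hmc,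
              pyRindexAux, hj]
          · rw [hsuf, hhd, firstGreater_cons, if_pos hmc]
            simp [scanB, h1, if_neg (not_lt.mpr (le_of_lt hmc)), if_pos hmc,
              pyRindexAux, hj]
        · have hcm' : c = m := le_antisymm (not_lt.mp hmc) (not_lt.mp hcm)
          have hhd : (if m < c then m else c) = c := if_neg hmc
          constructor
          · rw [hsuf, hhd]
            simp [scanB, h1, pyRindexAux, hcm', hj]
          · rw [hsuf, hhd, firstGreater_cons, hcm', if_neg (lt_irrefl m)]
            simp only [scanB, h1]
            rw [hshift, hcm']
            cases hF : firstGreater cs (m :: ms) with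
            | none => simp
            | some i => simp

-- the in-place double swap equals the sliced concatenation when i < y < length
theorem pySwap_eq_slices (t : List Char) (i y : Nat) (hiy : i < y) (hy : y < t.length) :
    pySwap t i y = t.take i ++ [t.getD y ' ']
      ++ (t.drop (i + 1)).take (y - (i + 1)) ++ [t.getD i ' '] ++ t.drop (y + 1) := by
  have hi : i < t.length := lt_trans hiy hy
  unfold pySwap
  have hinner : t.set i (t.getD y ' ') = t.take i ++ t.getD y ' ' :: t.drop (i + 1) := by
    rw [List.set_eq_take_append_cons_drop, if_pos hi]
  rw [hinner]
  have hlen : (t.take i).length = i := List.length_take_of_le (le_of_lt hi)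
  rw [List.set_append, if_neg (by rw [hlen]; omega), hlen]
  have hyi : y - i = (y - (i + 1)) + 1 := by omega
  rw [hyi, List.set_cons_succ]
  have houter : (t.drop (i + 1)).set (y - (i + 1)) (t.getD i ' ')
      = (t.drop (i + 1)).take (y - (i + 1))
        ++ t.getD i ' ' :: (t.drop (i + 1)).drop ((y - (i + 1)) + 1) := by
    rw [List.set_eq_take_append_cons_drop, if_pos (by simp; omega)]
  have hdd : (t.drop (i + 1)).drop ((y - (i + 1)) + 1) = t.drop (y + 1) := by
    rw [List.drop_drop]; congr 1; omega
  rw [houter, hdd]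
  simp

-- the two programs agree on every pair of strings
theorem solve_eq (a b : String) : solve a b = solve_alt a b := by
  obtain ⟨h1, h2⟩ := key_lemma a.toList
  obtain ⟨s1, s2⟩ := scanB_spec a.toList
  simp only [solve, solve_alt, h1, s2]
  cases hfg : firstGreater a.toList (suffixMin a.toList) with
  | none => simp
  | some i =>
    have hc := h2 i (by rw [h1, hfg])
    obtain ⟨hilen, hlt, hmem⟩ := fg_spec a.toList i hfg
    have hmemt : (suffixMin a.toList).getD i ' ' ∈ a.toList := List.mem_of_mem_drop hmem
    obtain ⟨y, hy⟩ : ∃ y, pyRindexAux ((suffixMin a.toList).getD i ' ') a.toList = some y := by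
      have hS := (pyRindexAux_isSome _ a.toList).mpr hmemt
      cases hr : pyRindexAux ((suffixMin a.toList).getD i ' ') a.toList with
      | some y => exact ⟨y, rfl⟩
      | none => rw [hr] at hS; simp at hS
    have hylen : y < a.toList.length := pyRindexAux_lt _ _ _ hy
    have hiy : i < y := by
      have hdropeq : a.toList.drop i = a.toList[i] :: a.toList.drop (i + 1) :=
        List.drop_eq_getElem_cons hilen
      have hgeq : a.toList.getD i ' ' = a.toList[i] := by
        rw [List.getD_eq_getElem?_getD, List.getElem?_eq_getElem hilen, Option.getD_some]
      have hmem' : (suffixMin a.toList).getD i ' ' ∈ a.toList.drop (i + 1) := by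
        rw [hdropeq] at hmem
        rcases List.mem_cons.mp hmem with he | h'
        · exfalso
          rw [hgeq, ← he] at hlt
          exact lt_irrefl _ hlt
        · exact h'
      obtain ⟨w, hw, hwe⟩ := List.mem_iff_getElem.mp hmem'
      have hw' : i + 1 + w < a.toList.length := by
        rw [List.length_drop] at hw; omega
      have hgd : a.toList.getD (i + 1 + w) ' ' = (suffixMin a.toList).getD i ' ' := by
        rw [List.getD_eq_getElem?_getD, List.getElem?_eq_getElem hw', Option.getD_some,
          ← hwe, List.getElem_drop]
      have := pyRindexAux_ge _ _ y (i + 1 + w) hy hw' hgd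
      omega
    have hswap := pySwap_eq_slices a.toList i y hiy hylen
    have e1 : PySem.List.slice a.toList none (some ((i : Nat) : Int)) = a.toList.take i :=
      PySem.List.slice_to_natCast _ _
    have e2 : PySem.List.slice a.toList (some (((i : Nat) : Int) + 1)) (some ((y : Nat) : Int))
        = (a.toList.drop (i + 1)).take (y - (i + 1)) := by
      have hca : ((i : Nat) : Int) + 1 = (((i + 1 : Nat)) : Int) := by push_cast; ring
      rw [hca, PySem.List.slice_natCast]
    have e3 : PySem.List.slice a.toList (some (((y : Nat) : Int) + 1)) none
        = a.toList.drop (y + 1) := by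
      have hca : ((y : Nat) : Int) + 1 = (((y + 1 : Nat)) : Int) := by push_cast; ring
      rw [hca, PySem.List.slice_from_natCast]
    simp only [Option.map_some]
    rw [hc, hy, Option.getD_some, hswap, e1, e2, e3]

-- ===== VERDICT (by name: the statement is the Claim_ definition above) =====
theorem solve_spec : Claim_equal_solve := by
  intro a b _
  unfold Spec_solve
  exact solve_eq a b
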